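-- pv_equiv track=rewrite | github.com/DavidKoplow/OpenRLHF | openrlhf/trainer/es_utils/checkpoints.py | detect_eval_metric_key
-- ===== SOURCE A (Python) =====
-- from typing import Dict, Optional, Tuple
--
-- def detect_eval_metric_key(
--     best_eval_metric_key: Optional[str],
--     eval_metrics: Dict,
-- ) -> Tuple[Optional[str], Optional[str]]:
--     if best_eval_metric_key == "none":
--         return None, best_eval_metric_key
--     if best_eval_metric_key:
--         return (
--             best_eval_metric_key if best_eval_metric_key in eval_metrics else None,
--             best_eval_metric_key,
--         )
--     for key in sorted(eval_metrics):
--         if key.endswith("_pass1"):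
--             return key, key
--     return None, best_eval_metric_key
-- ===== SOURCE B (Python) =====
-- def detect_eval_metric_key(best_eval_metric_key, eval_metrics):
--     if best_eval_metric_key == "none":
--         return None, best_eval_metric_key
--     if best_eval_metric_key:
--         return (
--             best_eval_metric_key if best_eval_metric_key in eval_metrics else None,
--             best_eval_metric_key,
--         )
--     best = min((k for k in eval_metrics if k.endswith("_pass1")), default=None)
--     if best is None:
--         return None, best_eval_metric_key
--     return best, best
-- ===== Notes on version B (the rewrite author's own statement) =====
-- stated objective: simpler
-- what changed: The sort-then-first-match loop is replaced by a single linear-scan minimum over the keys ending in '_pass1' (min with default=None), removing the sort entirely.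
import Mathlib
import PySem

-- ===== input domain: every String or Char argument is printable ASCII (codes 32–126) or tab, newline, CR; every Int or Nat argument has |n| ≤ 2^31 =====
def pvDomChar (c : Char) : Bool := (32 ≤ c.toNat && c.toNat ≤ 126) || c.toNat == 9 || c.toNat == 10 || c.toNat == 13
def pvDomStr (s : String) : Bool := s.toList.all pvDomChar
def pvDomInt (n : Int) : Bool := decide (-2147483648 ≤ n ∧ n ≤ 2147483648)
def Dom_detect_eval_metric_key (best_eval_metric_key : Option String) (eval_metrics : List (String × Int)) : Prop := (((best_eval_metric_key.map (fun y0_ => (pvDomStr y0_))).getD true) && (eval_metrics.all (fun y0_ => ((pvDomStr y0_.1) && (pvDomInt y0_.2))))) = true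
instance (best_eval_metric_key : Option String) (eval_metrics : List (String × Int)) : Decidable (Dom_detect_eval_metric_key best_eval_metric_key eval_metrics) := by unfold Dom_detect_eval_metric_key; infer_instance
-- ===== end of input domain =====

-- B replaces A's sort-then-first-match loop with a single linear-scan minimum over the '_pass1' keys: simpler, no sort.


-- ===== PORT A =====
-- the 'for key in sorted(eval_metrics): if key.endswith("_pass1"): return key, key' loop
def detectLoop (best : Option String) : List String → Option String × Option String
  | [] => (none, best)
  | k :: rest => if PySem.Str.endswith k "_pass1" then (some k, some k) else detectLoop best rest

def detect_eval_metric_key (best_eval_metric_key : Option String) (eval_metrics : List (String × Int)) : Option String × Option String :=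
  if best_eval_metric_key = some "none" then (none, best_eval_metric_key)
  else if best_eval_metric_key.getD "" ≠ "" then  -- Python truthiness of Optional[str]
    (if (eval_metrics.map (·.1)).contains (best_eval_metric_key.getD "") then best_eval_metric_key else none,
     best_eval_metric_key)
  else
    detectLoop best_eval_metric_key (PySem.List.sorted (eval_metrics.map (·.1)) (fun k => k) false)

-- ===== PORT B =====
def detect_eval_metric_key_alt (best_eval_metric_key : Option String) (eval_metrics : List (String × Int)) : Option String × Option String :=
  if best_eval_metric_key = some "none" then (none, best_eval_metric_key)
  else if best_eval_metric_key.getD "" ≠ "" then  -- Python truthiness of Optional[str]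
    (if (eval_metrics.map (·.1)).contains (best_eval_metric_key.getD "") then best_eval_metric_key else none,
     best_eval_metric_key)
  else
    -- min((k for k in eval_metrics if k.endswith("_pass1")), default=None)
    match PySem.List.min? ((eval_metrics.map (·.1)).filter (fun k => PySem.Str.endswith k "_pass1")) (fun k => k) with
    | none => (none, best_eval_metric_key)
    | some b => (some b, some b)

-- ===== PRECONDITION & SPEC =====
def Spec_detect_eval_metric_key (best_eval_metric_key : Option String) (eval_metrics : List (String × Int)) (out : Option String × Option String) : Prop := out = detect_eval_metric_key_alt best_eval_metric_key eval_metrics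
instance (best_eval_metric_key : Option String) (eval_metrics : List (String × Int)) (out : Option String × Option String) : Decidable (Spec_detect_eval_metric_key best_eval_metric_key eval_metrics out) := by unfold Spec_detect_eval_metric_key; infer_instance

-- ===== CLAIM (what is proved, stated in full; the proofs are below) =====
def Claim_equal_detect_eval_metric_key : Prop := ∀ (best_eval_metric_key : Option String) (eval_metrics : List (String × Int)), Dom_detect_eval_metric_key best_eval_metric_key eval_metrics → Spec_detect_eval_metric_key best_eval_metric_key eval_metrics (detect_eval_metric_key best_eval_metric_key eval_metrics)

-- ===== LEMMAS AND PROOFS =====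

-- A's loop returns the first '_pass1' key, i.e. the head of the filtered list
theorem detectLoop_eq_head_filter (best : Option String) (l : List String) :
    detectLoop best l =
      match (l.filter (fun k => PySem.Str.endswith k "_pass1")).head? with
      | none => (none, best)
      | some k => (some k, some k) := by
  induction l with
  | nil => rfl
  | cons k rest ih =>
    by_cases h : PySem.Str.endswith k "_pass1" = true
    · simp only [PySem.Str.endswith_eq,
        show "_pass1".toList = ['_','p','a','s','s','1'] from rfl] at h
      simp [detectLoop, h]
    · simp only [PySem.Str.endswith_eq,
        show "_pass1".toList = ['_','p','a','s','s','1'] from rfl] at h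
      simp [detectLoop, h, ih]

-- head of a ≤-sorted list is min? of any permutation of it
theorem head?_eq_min?_of_perm (l f : List String) (hp : l.Perm f)
    (hs : l.Pairwise (· ≤ ·)) :
    l.head? = PySem.List.min? f (fun k => k) := by
  cases l with
  | nil =>
    have : f = [] := hp.symm.eq_nil
    simp [this, PySem.List.min?]
  | cons h t =>
    have hf : f ≠ [] := by
      intro hfe
      exact absurd (hp.trans (by simp [hfe])).eq_nil (by simp)
    obtain ⟨m, hm⟩ : ∃ m, PySem.List.min? f (fun k => k) = some m := by
      cases hmin : PySem.List.min? f (fun k => k) with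
      | none => exact absurd ((PySem.List.min?_eq_none_iff f (fun k => k)).mp hmin) hf
      | some m => exact ⟨m, rfl⟩
    have hmem : m ∈ (h :: t) := hp.symm.mem_iff.mp (PySem.List.min?_mem hm)
    have hhf : h ∈ f := hp.mem_iff.mp (by simp)
    have h1 : m ≤ h := PySem.List.min?_isMin hm h hhf
    have h2 : h ≤ m := by
      rcases List.mem_cons.mp hmem with rfl | hmt
      · exact le_refl _
      · exact (List.pairwise_cons.mp hs).1 m hmt
    simp [hm, le_antisymm h2 h1]

-- ===== VERDICT (by name: the statement is the Claim_ definition above) =====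
theorem detect_eval_metric_key_spec : Claim_equal_detect_eval_metric_key := by
  intro best em _
  unfold Spec_detect_eval_metric_key detect_eval_metric_key detect_eval_metric_key_alt
  split_ifs with h1 h2 <;> try rfl
  rw [detectLoop_eq_head_filter]
  rw [head?_eq_min?_of_perm
      ((PySem.List.sorted (em.map (·.1)) (fun k => k) false).filter
        (fun k => PySem.Str.endswith k "_pass1"))
      ((em.map (·.1)).filter (fun k => PySem.Str.endswith k "_pass1"))
      ((PySem.List.sorted_perm (em.map (·.1)) (fun k => k) false).filter _)
      ((PySem.List.sorted_pairwise (em.map (·.1)) (fun k => k)).filter _)]
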